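/- GENERATED by mk_final_copies.py from the proof of the farm's unit `start_decoder.R16` (farm:start_decoder.R16.2: Proof.lean) as the
   re-elaboration sweep compiled it — do not edit. -/
import Asan.CheckWalk
import Vorbis.Spec.StartDecoderMid
import Vorbis.Spec.Units.start_decoder_R16
import Vorbis.Spec.Worked.start_decoder_R16_Lemmas

open X86 X86.User Asan Vorbis Vorbis.Spec Vorbis.Spec.StartDecoder

set_option maxRecDepth 4000
set_option maxHeartbeats 4000000

/-
  start_decoder.R16 (0x11665c – 0x11677f, stb_vorbis_fixed.c 4159 – 4163): the three buffers of channel `i`.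
  The segment is cut at its call returns (Lemmas.lean: `seg1` entry → `cut320`, `seg2` → `cut321`, `seg3` → `cut322`; here:
  `seg4` → `cut323` (error) | `cut324` (memset), `seg5` → R15 with `i + 1`, `seg6` → the common epilogue), the cut
  assertions are `CutA` … `CutE` = `SecPt … 9 9 10 A9 A` (Vorbis/Spec/StartDecoderMid.lean) + the loop's transient `Tr` + what is
  known of channel `i`'s pointers. The theorem chains the pieces with `ReachVia.trans`.
-/
namespace Vorbis.Spec.start_decoder_R16

/-- `movsxd rdx, [f->blocksize_1] ; shl rdx, 2`: memset's length is `4·b1`. -/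
theorem shl2 (b : Nat) (hb : b ≤ 8192) : (UInt64.ofNat b <<< 2).toNat = 4 * b := by
  have e2 : (2 : UInt64).toNat % 64 = 2 := by decide
  rw [UInt64.toNat_shiftLeft, UInt64.toNat_ofNat', e2, Nat.shiftLeft_eq]
  omega

/-- **R16, piece 4** (`cut322` 0x1166f6 … 0x11674d / 0x116776, returns into `cut323` or `cut324`): the checked store of
`finalY[i]`, the joint NULL test of the three pointers (two checked reloads), then `error(f, VORBIS_outofmem)` (three paths) or
the checked load of `blocksize_1` and `memset(channel_buffers[i], 0, 4·b1)`. -/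
theorem seg4 {Lay : Layout} (hLay : Lay.hi = 0x1000000) {μ : Microarch} (hμ : UserX.MicroOK μ) {u₀ : State}
    (hcode : HasCodeNat Lay u₀ Vorbis.L.start_decoder.entry Vorbis.Code.code_start_decoder.nat Vorbis.L.start_decoder.size)
    (hload4 : Asan.SmallCheck Lay μ Vorbis.WayInv (Vorbis.CodeOK u₀) [.rax, .rcx, .rdx] 4 Vorbis.L.__asan_load4_noabort.entry)
    (hstore8 : Asan.SmallCheck Lay μ Vorbis.WayInv (Vorbis.CodeOK u₀) [.rax, .rcx, .rdx] 8 Vorbis.L.__asan_store8_noabort.entry)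
    (hload8 : Asan.SmallCheck Lay μ Vorbis.WayInv (Vorbis.CodeOK u₀) [.rax, .rcx, .rdx] 8 Vorbis.L.__asan_load8_noabort.entry)
    (h_error : ∀ (others : List Obj) (frames : List (Nat × FrameLayout)),
      Calls Lay μ Vorbis.WayInv (Vorbis.conv u₀) Vorbis.L.error.entry (Vorbis.Spec.error.spec others frames))
    (h_memset : ∀ (others : List Obj) (frames : List (Nat × FrameLayout)),
      Calls Lay μ Vorbis.WayInv (Vorbis.conv u₀) Vorbis.L.memset.entry (Vorbis.Spec.memset.spec others frames))
    {g : Ghost} {i b1 : Nat} {v : State} {A9 : Arena} {A : Arena × List Obj} (hb : CutC u₀ g i b1 A9 A v) :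
    ReachVia Lay μ WayInv v (fun w => CutE u₀ g A9 A w ∨ CutD u₀ g i A9 A w) := by
  have hpt := hb.pt
  have hfr := hpt.frame
  have hh := hpt.hand
  have hm := hpt.mid
  have hp : Pos g A := hpt.pos
  have he := hfr.entry
  v_entry he
  obtain ⟨hRa, hR8⟩ := hfr.r_eq
  simp only [steady, Ghost.RA] at hRa
  simp only [depth] at he_room he_stack
  have hflo := hp.f_lo
  have hf2 := hp.f_hi
  have hf3 := hp.f_stack
  simp only [Ghost.RA] at hf3
  have hRn : (addr g.R).toNat = g.R := toNat_addr _ (by omega)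
  have hfn : (addr g.f).toNat = g.f := toNat_addr _ (by omega)
  have w_rip := hfr.rip
  have c_rsp := hfr.rsp
  have c_rbp := hpt.rbp
  have c_rbx := hb.rbx
  have c_r12 := hb.r12
  have c_r13 := hb.r13
  have c_r14 : v.reg .r14 = UInt64.ofNat i := hb.r14
  have w_eq : Mem.EqOn Vorbis.L.textLo Vorbis.L.textHi u₀.mem v.mem := hfr.code
  have hdf : v.flags .df = false := (show abiInv _ from hfr.inv).1
  have hmx : v.mxcsr &&& 0x1F80 = 0x1F80 := (show abiInv _ from hfr.inv).2
  have hsse := Vorbis.sseOK_of_abiInv hfr.inv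
  have herr := h_error A.2 g.frames'
  have hms := h_memset A.2 g.frames'
  have hd1 := hm.header.HD1
  have hlt := hb.tr.lt
  have hi16 : i < 16 := by omega
  have hb1le := hb.bs_le
  have hb1r : v.mem.readLE (addr g.f + 156) 4 = b1 := by
    have hu := hb.bs
    simp only [vacc, voff] at hu
    rw [addr_add_lit]
    exact i32_read hu
  -- the two pointers stored by pieces 2 and 3, as the qwords the reloads at 0x116717 / 0x116738 read
  obtain ⟨p1, hp1⟩ : ∃ p1 : Nat, stb_vorbis.channel_buffers v.mem g.f i = p1 := ⟨_, rfl⟩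
  obtain ⟨p2, hp2⟩ : ∃ p2 : Nat, stb_vorbis.previous_window v.mem g.f i = p2 := ⟨_, rfl⟩
  have hp1lt : p1 < 2 ^ 64 := by
    rw [← hp1]
    simp only [vacc, voff]
    exact Mem.u64_lt _ _
  have ea1 : addr g.f + (UInt64.ofNat i + 108) * 8 + 8 = addr (g.f + 872 + 8 * i) := by
    apply eq_addr
    u_omega
  have ea2 : addr g.f + (UInt64.ofNat i + 140) * 8 + 8 = addr (g.f + 1128 + 8 * i) := by
    apply eq_addr
    u_omega
  have ea3 : addr g.f + (UInt64.ofNat i + 158) * 8 = addr (g.f + 1264 + 8 * i) := by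
    apply eq_addr
    u_omega
  have hcbv : v.mem.readLE (addr g.f + (UInt64.ofNat i + 108) * 8 + 8) 8 = p1 := by
    have hu := hp1
    simp only [vacc, voff] at hu
    unfold Mem.u64 at hu
    rw [ea1]
    exact hu
  have hpwv : v.mem.readLE (addr g.f + (UInt64.ofNat i + 140) * 8 + 8) 8 = p2 := by
    have hu := hp2
    simp only [vacc, voff] at hu
    unfold Mem.u64 at hu
    rw [ea2]
    exact hu
  clear ea1 ea2 ea3 hp1lt
  u_walk hcode [hμ.vendor, cnt32_sext_bv i (by omega), cnt32_part i, cnt32_sext_bv b1 (by omega)] until [Vorbis.L.start_decoder.cut323, Vorbis.L.start_decoder.cut324] span [Vorbis.L.textLo, Vorbis.L.textHi] side (v_side)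
  case check_116705 =>
    -- 0x116705: the store of `f->finalY[i]` (f + 1264 + 8i)
    have hun : ShadowUntouched v.mem s_116705.mem := by v_untouched
    refine (hh.obj.mono (frames'_sub g A.2)).accSmall hfr.shadow hun _ 8 (by decide) (by u_omega) ?_
    simp only [Off.sizeof.stb_vorbis]
    u_omega
  case check_116712 =>
    -- 0x116712: the reload of `f->channel_buffers[i]`
    have hun : ShadowUntouched v.mem s_116712.mem := by v_untouched
    refine (hh.obj.mono (frames'_sub g A.2)).accSmall hfr.shadow hun _ 8 (by decide) (by u_omega) ?_
    simp only [Off.sizeof.stb_vorbis]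
    u_omega
  case call_inv => v_inv
  case pre_11674d =>
    -- 0x11674d (path 1: `channel_buffers[i] == NULL`): `error(f, VORBIS_outofmem)`
    have hun : ShadowUntouched v.mem s_11674d.mem := by v_untouched
    refine ⟨shadowPre_call hfr (by rw [w_rsp]; u_omega) hun, ?_⟩
    rw [w_rdi, hfn]
    exact hh.obj.mono (frames'_sub g A.2)
  case check_116733 =>
    -- 0x116733: the reload of `f->previous_window[i]`
    have hun : ShadowUntouched v.mem s_116733.mem := by v_untouched
    refine (hh.obj.mono (frames'_sub g A.2)).accSmall hfr.shadow hun _ 8 (by decide) (by u_omega) ?_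
    simp only [Off.sizeof.stb_vorbis]
    u_omega
  case call_inv => v_inv
  case pre_11674d =>
    -- 0x11674d (path 2: `previous_window[i] == NULL`)
    have hun : ShadowUntouched v.mem s_11674d.mem := by v_untouched
    refine ⟨shadowPre_call hfr (by rw [w_rsp]; u_omega) hun, ?_⟩
    rw [w_rdi, hfn]
    exact hh.obj.mono (frames'_sub g A.2)
  case check_11675e =>
    -- 0x11675e: the load of `f->blocksize_1`
    have hun : ShadowUntouched v.mem s_11675e.mem := by v_untouched
    refine (hh.obj.mono (frames'_sub g A.2)).accSmall hfr.shadow hun _ 4 (by decide) (by u_omega) ?_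
    simp only [Off.sizeof.stb_vorbis]
    u_omega
  case call_inv => v_inv
  case pre_116776 =>
    -- 0x116776: `memset(channel_buffers[i], 0, 4·b1)`: the block is ONE live object
    have hun : ShadowUntouched v.mem s_116776.mem := by v_untouched
    have hp1lt : p1 < 2 ^ 64 := by
      rw [← hp1]
      simp only [vacc, voff]
      exact Mem.u64_lt _ _
    have hne1 : stb_vorbis.channel_buffers v.mem g.f i ≠ 0 := by
      rw [hp1]
      intro e
      apply hbr_11671f
      rw [e]
      rfl
    have hS1 := hb.cb.resolve_left hne1
    rw [hp1] at hS1
    have hrdx : (s_116776.reg .rdx).toNat = 4 * b1 := by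
      rw [w_rdx]
      exact shl2 b1 hb1le
    have hrdi : (s_116776.reg .rdi).toNat = p1 := by
      rw [w_rdi, UInt64.toNat_ofNat']
      omega
    refine ⟨shadowPre_call hfr (by rw [w_rsp]; u_omega) hun, Or.inr ?_⟩
    rw [hrdi, hrdx]
    exact liveIn_of_since hm hS1
  case call_inv => v_inv
  case pre_11674d =>
    -- 0x11674d (path 3: `finalY[i] == NULL`)
    have hun : ShadowUntouched v.mem s_11674d.mem := by v_untouched
    refine ⟨shadowPre_call hfr (by rw [w_rsp]; u_omega) hun, ?_⟩
    rw [w_rdi, hfn]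
    exact hh.obj.mono (frames'_sub g A.2)
  case cont =>
    -- the returned state of `error` (0x116752): `channel_buffers[i] == NULL`
    have hspn : (s_11674d.reg .rsp).toNat = g.R - 8 := by
      rw [w_rsp_11674d]
      u_omega
    have hrdi : (s_11674d.reg .rdi).toNat = g.f := by
      rw [w_rdi_11674d]
      exact hfn
    have hun0 : ShadowUntouched v.mem s_11674d.mem := by v_untouched
    have hs0 : Mem.SameExcept [⟨g.R - 8, g.R⟩, ⟨g.f + 1264 + 8 * i, g.f + 1272 + 8 * i⟩] v.mem s_11674d.mem := by
      u_same
    have hsB := w_same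
    simp only [X86.User.Spec.footprint, vspec] at hsB
    rw [hrdi, hspn] at hsB
    have hrbp : s_11674dr.reg .rbp = addr g.f := by
      rw [w_kept.get .rbp rfl]
      exact c_rbp
    exact ReachVia.done (Or.inl (err_ret hb hs0 hun0 hsB w_post.2.1 w_rip w_rsp (Vorbis.conv_code_eqOn w_code) w_inv hrbp
      w_post.1))
  case cont =>
    -- the returned state of `error` (0x116752): `previous_window[i] == NULL`
    have hspn : (s_11674d.reg .rsp).toNat = g.R - 8 := by
      rw [w_rsp_11674d]
      u_omega
    have hrdi : (s_11674d.reg .rdi).toNat = g.f := by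
      rw [w_rdi_11674d]
      exact hfn
    have hun0 : ShadowUntouched v.mem s_11674d.mem := by v_untouched
    have hs0 : Mem.SameExcept [⟨g.R - 8, g.R⟩, ⟨g.f + 1264 + 8 * i, g.f + 1272 + 8 * i⟩] v.mem s_11674d.mem := by
      u_same
    have hsB := w_same
    simp only [X86.User.Spec.footprint, vspec] at hsB
    rw [hrdi, hspn] at hsB
    have hrbp : s_11674dr.reg .rbp = addr g.f := by
      rw [w_kept.get .rbp rfl]
      exact c_rbp
    exact ReachVia.done (Or.inl (err_ret hb hs0 hun0 hsB w_post.2.1 w_rip w_rsp (Vorbis.conv_code_eqOn w_code) w_inv hrbp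
      w_post.1))
  case cont =>
    -- the returned state of `memset` (0x11677b): the three pointers are non-NULL
    have hp1lt : p1 < 2 ^ 64 := by
      rw [← hp1]
      simp only [vacc, voff]
      exact Mem.u64_lt _ _
    have hne1 : stb_vorbis.channel_buffers v.mem g.f i ≠ 0 := by
      rw [hp1]
      intro e
      apply hbr_11671f
      rw [e]
      rfl
    have hne2 : stb_vorbis.previous_window v.mem g.f i ≠ 0 := by
      rw [hp2]
      intro e
      apply hbr_11673e
      rw [e]
    have hne3 : v.reg .rax ≠ 0 := by
      intro e
      apply hbr_116743
      rw [e]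
      rfl
    have hspn : (s_116776.reg .rsp).toNat = g.R - 8 := by
      rw [w_rsp_116776]
      u_omega
    have hrdx : (s_116776.reg .rdx).toNat = 4 * b1 := by
      rw [w_rdx_116776]
      exact shl2 b1 hb1le
    have hrdi : (s_116776.reg .rdi).toNat = p1 := by
      rw [w_rdi_116776, UInt64.toNat_ofNat']
      omega
    have hun0 : ShadowUntouched v.mem s_116776.mem := by v_untouched
    have hs0 : Mem.SameExcept [⟨g.R - 8, g.R⟩, ⟨g.f + 1264 + 8 * i, g.f + 1272 + 8 * i⟩] v.mem s_116776.mem := by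
      u_same
    have ea3 : addr g.f + (UInt64.ofNat i + 158) * 8 = addr (g.f + 1264 + 8 * i) := by
      apply eq_addr
      u_omega
    have hfy0 : stb_vorbis.finalY s_116776.mem g.f i = (v.reg .rax).toNat := by
      have h0 : s_116776.mem.readLE (addr g.f + (UInt64.ofNat i + 158) * 8) 8 = (v.reg .rax).toNat := by
        rw [w_mem_116776]
        u_read
      simp only [vacc, voff]
      unfold Mem.u64
      rw [← ea3]
      exact h0
    have hsB := w_same
    simp only [X86.User.Spec.footprint, vspec] at hsB
    rw [hrdi, hrdx, hspn, ← hp1] at hsB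
    have hrbp : s_116776r.reg .rbp = addr g.f := by
      rw [w_kept.get .rbp rfl]
      exact c_rbp
    have hr14 : s_116776r.reg .r14 = addr i := by
      rw [w_kept.get .r14 rfl]
      exact hb.r14
    exact ReachVia.done (Or.inr (memset_ret hb hs0 hun0 hfy0 hne1 hne2 hne3 hsB w_post.2.1 w_rip w_rsp
      (Vorbis.conv_code_eqOn w_code) w_inv hrbp hr14))
  case cont =>
    -- the returned state of `error` (0x116752): `finalY[i] == NULL`
    have hspn : (s_11674d.reg .rsp).toNat = g.R - 8 := by
      rw [w_rsp_11674d]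
      u_omega
    have hrdi : (s_11674d.reg .rdi).toNat = g.f := by
      rw [w_rdi_11674d]
      exact hfn
    have hun0 : ShadowUntouched v.mem s_11674d.mem := by v_untouched
    have hs0 : Mem.SameExcept [⟨g.R - 8, g.R⟩, ⟨g.f + 1264 + 8 * i, g.f + 1272 + 8 * i⟩] v.mem s_11674d.mem := by
      u_same
    have hsB := w_same
    simp only [X86.User.Spec.footprint, vspec] at hsB
    rw [hrdi, hspn] at hsB
    have hrbp : s_11674dr.reg .rbp = addr g.f := by
      rw [w_kept.get .rbp rfl]
      exact c_rbp
    exact ReachVia.done (Or.inl (err_ret hb hs0 hun0 hsB w_post.2.1 w_rip w_rsp (Vorbis.conv_code_eqOn w_code) w_inv hrbp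
      w_post.1))


/-- **R16, piece 5** (`cut324` 0x11677b `add r14d, 1 ; jmp 115f97`): the head of the channel loop with `i + 1`. -/
theorem seg5 {Lay : Layout} (hLay : Lay.hi = 0x1000000) {μ : Microarch} (hμ : UserX.MicroOK μ) {u₀ : State}
    (hcode : HasCodeNat Lay u₀ Vorbis.L.start_decoder.entry Vorbis.Code.code_start_decoder.nat Vorbis.L.start_decoder.size)
    {g : Ghost} {i : Nat} {v : State} {A9 : Arena} {A : Arena × List Obj} (hb : CutD u₀ g i A9 A v) :
    ReachVia Lay μ WayInv v (fun w => AtR15 u₀ g (i + 1) w) := by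
  have hpt := hb.pt
  have hfr := hpt.frame
  have hh := hpt.hand
  have hm := hpt.mid
  have hp : Pos g A := hpt.pos
  have he := hfr.entry
  v_entry he
  obtain ⟨hRa, hR8⟩ := hfr.r_eq
  simp only [steady, Ghost.RA] at hRa
  simp only [depth] at he_room he_stack
  have w_rip := hfr.rip
  have c_rsp := hfr.rsp
  have c_rbp := hpt.rbp
  have c_r14 : v.reg .r14 = UInt64.ofNat i := hb.r14
  have w_eq : Mem.EqOn Vorbis.L.textLo Vorbis.L.textHi u₀.mem v.mem := hfr.code
  have hdf : v.flags .df = false := (show abiInv _ from hfr.inv).1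
  have hmx : v.mxcsr &&& 0x1F80 = 0x1F80 := (show abiInv _ from hfr.inv).2
  have hsse := Vorbis.sseOK_of_abiInv hfr.inv
  have w_kept : RegsKept [.rsp] v v := RegsKept.refl _ _
  have hd1 := hm.header.HD1
  have hlt := hb.tr.lt
  have hi16 : i < 16 := by omega
  u_walk hcode [hμ.vendor, cnt32_succ i (by omega)] until [Vorbis.L.start_decoder.cut274] span [Vorbis.L.textLo, Vorbis.L.textHi] side (v_side)
  -- 0x115f97: the memory is that of `cut324`, `r14d = i + 1`
  have habi : abiInv s_11677f := by
    refine Vorbis.abiInv_of ?_ ?_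
    · rw [w_flags]
      simp only [X86.User.df_setStatus]
      exact hdf
    · rw [w_mxcsr]
      exact hmx
  have hfE : FInv g A s_11677f.mem := by
    rw [w_mem]
    exact FInv.of hfr
  have hfr' : Frame u₀ g pc_R15 A s_11677f := hfE.frame hfr w_rip w_rsp w_eq habi hfr.offText hfr.ext
  refine ReachVia.done ⟨A9, A, ?_⟩
  show ChanLoop u₀ g pc_R15 (i + 1) A9 A s_11677f
  refine ⟨hfr', hh, ?_, ?_, w_r14, ?_, ?_, ?_, ?_⟩
  · rw [w_mem]
    exact hm
  · rw [w_kept.get .rbp rfl]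
    exact c_rbp
  · rw [w_mem]
    push_cast
    omega
  · rw [w_mem]
    exact hb.tr.prev0
  · rw [w_mem]
    exact hb.tr.chan
  · rw [w_mem]
    exact hb.tr.fy

/-- **R16, piece 6** (`cut323` 0x116752 `jmp 113b22`): the common epilogue with eax = 0 and `Failed` (`Mid.failed_late`: every
H-clause of `DeinitOK` is a finished group at point 9). -/
theorem seg6 {Lay : Layout} (hLay : Lay.hi = 0x1000000) {μ : Microarch} (hμ : UserX.MicroOK μ) {u₀ : State}
    (hcode : HasCodeNat Lay u₀ Vorbis.L.start_decoder.entry Vorbis.Code.code_start_decoder.nat Vorbis.L.start_decoder.size)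
    {g : Ghost} {v : State} {A9 : Arena} {A : Arena × List Obj} (hb : CutE u₀ g A9 A v) :
    ReachVia Lay μ WayInv v (fun w => AtERR u₀ g w) := by
  have hpt := hb.pt
  have hfr := hpt.frame
  have hh := hpt.hand
  have hm := hpt.mid
  have he := hfr.entry
  v_entry he
  obtain ⟨hRa, hR8⟩ := hfr.r_eq
  simp only [steady, Ghost.RA] at hRa
  simp only [depth] at he_room he_stack
  have w_rip := hfr.rip
  have c_rsp := hfr.rsp
  have c_rax := hb.rax
  have w_eq : Mem.EqOn Vorbis.L.textLo Vorbis.L.textHi u₀.mem v.mem := hfr.code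
  have hdf : v.flags .df = false := (show abiInv _ from hfr.inv).1
  have hmx : v.mxcsr &&& 0x1F80 = 0x1F80 := (show abiInv _ from hfr.inv).2
  have hsse := Vorbis.sseOK_of_abiInv hfr.inv
  have w_kept : RegsKept [.rsp] v v := RegsKept.refl _ _
  u_walk hcode [hμ.vendor] until [Vorbis.L.start_decoder.cut4] span [Vorbis.L.textLo, Vorbis.L.textHi] side (v_side)
  have habi : abiInv s_116752 := by
    refine Vorbis.abiInv_of ?_ ?_
    · rw [w_flags]
      exact hdf
    · rw [w_mxcsr]
      exact hmx
  have hfE : FInv g A s_116752.mem := by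
    rw [w_mem]
    exact FInv.of hfr
  have hfrE : Frame u₀ g pc_ERR A s_116752 := hfE.frame hfr w_rip w_rsp w_eq habi hfr.offText hfr.ext
  have hfailed : Failed g.len g.f (g.Live A) A s_116752.mem := by
    rw [w_mem]
    exact hm.failed_late (by decide)
  refine ReachVia.done ⟨A, hfrE, hh, Or.inl ⟨?_, hfailed⟩⟩
  rw [w_kept.get .rax rfl, c_rax]
  rfl

end Vorbis.Spec.start_decoder_R16

/-- The unit `start_decoder.R16`: the six pieces chained at their cut points. -/
theorem Vorbis.Spec.Worked.start_decoder_R16_ok : Vorbis.Spec.start_decoder_R16.Statement := by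
  intro Lay hLay μ hμ u₀ hcode hload4 h_setup_malloc hstore8 hload8 h_error h_memset g i v hat
  obtain ⟨A9, A, hb⟩ := hat
  -- 0x11665c → cut320
  refine ReachVia.trans (Vorbis.Spec.start_decoder_R16.seg1 hLay hμ hcode hload4 h_setup_malloc hb) ?_
  intro v1 h1
  obtain ⟨b1, A1, hA⟩ := h1
  -- cut320 → cut321
  refine ReachVia.trans (Vorbis.Spec.start_decoder_R16.seg2 hLay hμ hcode hload4 hstore8 h_setup_malloc hA) ?_
  intro v2 h2
  obtain ⟨A2, hB⟩ := h2
  -- cut321 → cut322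
  refine ReachVia.trans (Vorbis.Spec.start_decoder_R16.seg3 hLay hμ hcode hstore8 h_setup_malloc hB) ?_
  intro v3 h3
  obtain ⟨A3, hC⟩ := h3
  -- cut322 → cut323 (after `error`) | cut324 (after `memset`)
  refine ReachVia.trans (Vorbis.Spec.start_decoder_R16.seg4 hLay hμ hcode hload4 hstore8 hload8 h_error h_memset hC) ?_
  intro v4 h4
  rcases h4 with hE | hD
  · -- cut323 → 0x113b22: `AtERR`
    refine ReachVia.trans (Vorbis.Spec.start_decoder_R16.seg6 hLay hμ hcode hE) ?_
    intro w hw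
    exact ReachVia.done (Or.inr hw)
  · -- cut324 → 0x115f97: `AtR15` with `i + 1`
    refine ReachVia.trans (Vorbis.Spec.start_decoder_R16.seg5 hLay hμ hcode hD) ?_
    intro w hw
    exact ReachVia.done (Or.inl hw)
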